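-- pv_equiv track=rewrite | github.com/mikemol/cstz | scripts/structural_identity.py | sparse_wedge
-- ===== SOURCE A (Python) =====
-- WedgeElement = frozenset  # frozenset[int]
--
-- def sparse_wedge(f: WedgeElement, g: WedgeElement) -> WedgeElement:
--     """Wedge product of two sparse exterior elements.
--
--     Implements ``h[s|t] ^= f[s] & g[t]`` for ``s & t == 0``:
--     for each disjoint pair (s, t) in F × G, XOR in s|t to the result.
--     Equivalent to ``cstz.exterior.ext_wedge`` under sparse semantics.
--     """
--     result: set[int] = set()
--     for s in f:
--         for t in g:
--             if (s & t) == 0: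
--                 union = s | t
--                 if union in result:
--                     result.discard(union)  # XOR: 1^1 = 0
--                 else:
--                     result.add(union)
--     return frozenset(result)
-- ===== SOURCE B (Python) =====
-- WedgeElement = frozenset  # frozenset[int]
--
-- def sparse_wedge(f: WedgeElement, g: WedgeElement) -> WedgeElement:
--     """Divide-and-conquer over f with set algebra: the wedge of a single
--     generator s is the (duplicate-free) set {s | t for t in g if s & t == 0},
--     and the wedge of a larger F splits F in half and combines the two halves
--     with frozenset symmetric difference (^), which realises the XOR semantics
--     at the set level instead of toggling elements one by one."""
--     fs = list(f)
--
--     def go(lo: int, hi: int) -> frozenset: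
--         if hi - lo == 0:
--             return frozenset()
--         if hi - lo == 1:
--             s = fs[lo]
--             return frozenset(s | t for t in g if s & t == 0)
--         mid = (lo + hi) // 2
--         return go(lo, mid) ^ go(mid, hi)
--
--     return go(0, len(fs))
-- ===== Notes on version B (the rewrite author's own statement) =====
-- stated objective: alternative
-- what changed: B replaces A's flat double loop with element-wise XOR toggling by a divide-and-conquer recursion over f: the wedge of a single generator is built as one duplicate-free comprehension set, and larger inputs are split in half and the two recursive results are combined with whole-set symmetric difference (^), which realises the XOR semantics at the set level.
import Mathlib
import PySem

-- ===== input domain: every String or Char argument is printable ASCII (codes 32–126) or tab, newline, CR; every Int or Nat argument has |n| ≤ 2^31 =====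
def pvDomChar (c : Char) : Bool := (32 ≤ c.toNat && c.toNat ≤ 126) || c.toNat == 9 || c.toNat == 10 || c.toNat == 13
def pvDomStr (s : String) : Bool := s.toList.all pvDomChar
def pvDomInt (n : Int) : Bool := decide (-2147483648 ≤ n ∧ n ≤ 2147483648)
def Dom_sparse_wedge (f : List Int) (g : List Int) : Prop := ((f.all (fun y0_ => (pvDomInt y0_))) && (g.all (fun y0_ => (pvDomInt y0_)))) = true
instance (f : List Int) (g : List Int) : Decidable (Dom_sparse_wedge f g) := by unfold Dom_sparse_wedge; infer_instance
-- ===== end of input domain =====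

-- B replaces A's flat double loop with element-wise XOR toggling by a divide-and-conquer
-- recursion over f whose combine step is whole-set symmetric difference (objective: alternative).
-- Both ports return the resulting SET in ascending order (a frozenset's iteration order is
-- unspecified; set outputs are compared as finite sets).

-- ===== PORT A =====
def sparse_wedge (f : List Int) (g : List Int) : List Int :=
  PySem.List.sorted
    (f.foldl (fun result s =>
      g.foldl (fun result t =>
        if PySem.Int.band s t = 0 then
          -- union = s | t; XOR toggle: discard if present, else add
          if PySem.Set.contains result (PySem.Int.bor s t) then
            PySem.Set.discard result (PySem.Int.bor s t)
          else
            PySem.Set.add result (PySem.Int.bor s t)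
        else result) result) PySem.Set.empty)
    (fun x => x) false

-- ===== PORT B =====
-- frozenset(s | t for t in g if s & t == 0)  (s = fs[lo]; the index lo is always in range)
def pvRow (g : List Int) (s : Int) : List Int :=
  PySem.Set.ofList ((g.filter (fun t => decide (PySem.Int.band s t = 0))).map
    (fun t => PySem.Int.bor s t))

-- the recursive helper 'go(lo, hi)' of Source B; 'fuel' only bounds the recursion depth
-- (it is called with fuel = hi - lo, which the halving recursion never exhausts)
def pvGo (fs : List Int) (g : List Int) (fuel : Nat) (lo : Nat) (hi : Nat) : List Int :=
  match fuel with
  | 0 => PySem.Set.empty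
  | fuel + 1 =>
    if hi - lo = 0 then PySem.Set.empty
    else if hi - lo = 1 then pvRow g (fs.getD lo 0)
    else
      PySem.Set.symmDiff (pvGo fs g fuel lo ((lo + hi) / 2)) (pvGo fs g fuel ((lo + hi) / 2) hi)

def sparse_wedge_alt (f : List Int) (g : List Int) : List Int :=
  PySem.List.sorted (pvGo f g f.length 0 f.length) (fun x => x) false

-- ===== PRECONDITION & SPEC =====
-- Pre_: g encodes a frozenset, so by the type convention its list holds DISTINCT elements;
-- a duplicated element in g has no Python counterpart (A would toggle the same union twice,
-- B's comprehension set dedups it).  No assumption on f is needed.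
def Pre_sparse_wedge (f : List Int) (g : List Int) : Prop := List.Nodup g
instance (f : List Int) (g : List Int) : Decidable (Pre_sparse_wedge f g) := by unfold Pre_sparse_wedge; infer_instance
def pvWitness_sparse_wedge : List Int × List Int := ([1, 2], [4, 8])
def Spec_sparse_wedge (f : List Int) (g : List Int) (out : List Int) : Prop := out = sparse_wedge_alt f g
instance (f : List Int) (g : List Int) (out : List Int) : Decidable (Spec_sparse_wedge f g out) := by unfold Spec_sparse_wedge; infer_instance

-- ===== CLAIM (what is proved, stated in full; the proofs are below) =====
def Claim_equal_sparse_wedge : Prop := ∀ (f : List Int) (g : List Int), Dom_sparse_wedge f g → Pre_sparse_wedge f g → Spec_sparse_wedge f g (sparse_wedge f g)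

-- ===== LEMMAS AND PROOFS =====

-- the stream of unions of disjoint pairs, in A's loop order
def pvUnions (f : List Int) (g : List Int) : List Int :=
  f.flatMap (fun s => (g.filter (fun t => decide (PySem.Int.band s t = 0))).map
    (fun t => PySem.Int.bor s t))

-- A's toggle step
def pvToggle (r : PySem.Set Int) (u : Int) : PySem.Set Int :=
  if PySem.Set.contains r u then PySem.Set.discard r u else PySem.Set.add r u

-- A's double loop is the fold of the toggle step over pvUnions
lemma pv_double_loop {σ : Type} (step : σ → Int → σ) (f g : List Int) (init : σ) :
    f.foldl (fun acc s =>
      g.foldl (fun acc t =>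
        if PySem.Int.band s t = 0 then step acc (PySem.Int.bor s t) else acc) acc) init
    = (pvUnions f g).foldl step init := by
  induction f generalizing init with
  | nil => rfl
  | cons s f ih =>
    simp only [List.foldl_cons, pvUnions, List.flatMap_cons, List.foldl_append, ih]
    congr 1
    rw [List.foldl_map, PySem.List.foldl_ite_eq_foldl_filter]

lemma pv_mem_toggle (r : PySem.Set Int) (u x : Int) :
    x ∈ pvToggle r u ↔ (if x = u then x ∉ r else x ∈ r) := by
  by_cases hu : u ∈ r
  · rw [pvToggle, if_pos ((PySem.Set.contains_iff r u).mpr hu)]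
    rw [PySem.Set.mem_discard]
    by_cases hx : x = u <;> simp [hx, hu]
  · rw [pvToggle, if_neg (fun h => hu ((PySem.Set.contains_iff r u).mp h))]
    rw [PySem.Set.mem_add]
    by_cases hx : x = u <;> simp [hx, hu]

lemma pv_nodup_toggle (r : PySem.Set Int) (u : Int) (hr : r.Nodup) :
    (pvToggle r u).Nodup := by
  unfold pvToggle
  split
  · exact PySem.Set.nodup_discard r u hr
  · exact PySem.Set.nodup_add r u hr

lemma pv_toggle_fold (us : List Int) (r : PySem.Set Int) (hr : r.Nodup) :
    (us.foldl pvToggle r).Nodup ∧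
    ∀ x, x ∈ us.foldl pvToggle r ↔ ((x ∈ r) ↔ us.count x % 2 = 0) := by
  induction us generalizing r with
  | nil => exact ⟨hr, by simp⟩
  | cons u us ih =>
    obtain ⟨hn, hm⟩ := ih (pvToggle r u) (pv_nodup_toggle r u hr)
    refine ⟨hn, fun x => ?_⟩
    rw [List.foldl_cons, hm x, pv_mem_toggle r u x, List.count_cons]
    by_cases hx : x = u
    · subst hx
      simp only [beq_self_eq_true, if_true]
      by_cases hxr : x ∈ r <;> simp [hxr] <;> omega
    · have hux : ¬ u = x := fun h => hx h.symm
      simp [hx, hux]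

lemma pv_loop_A (f g : List Int) :
    (f.foldl (fun result s =>
      g.foldl (fun result t =>
        if PySem.Int.band s t = 0 then
          if PySem.Set.contains result (PySem.Int.bor s t) then
            PySem.Set.discard result (PySem.Int.bor s t)
          else
            PySem.Set.add result (PySem.Int.bor s t)
        else result) result) PySem.Set.empty)
    = (pvUnions f g).foldl pvToggle PySem.Set.empty :=
  pv_double_loop pvToggle f g PySem.Set.empty

-- B-side: t ↦ s | t is injective on the t disjoint from s
lemma pv_nat_or_inj (a b1 b2 : Nat) (h1 : a &&& b1 = 0) (h2 : a &&& b2 = 0)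
    (he : a ||| b1 = a ||| b2) : b1 = b2 := by
  apply Nat.eq_of_testBit_eq
  intro i
  have e1 := congrArg (fun x => x.testBit i) h1
  have e2 := congrArg (fun x => x.testBit i) h2
  have ee := congrArg (fun x => x.testBit i) he
  simp only [Nat.testBit_and, Nat.testBit_or, Nat.zero_testBit] at e1 e2 ee
  cases ha : a.testBit i <;> simp [ha] at e1 e2 ee <;> simp [e1, e2, ee]

lemma pv_bor_inj (s t1 t2 : Int) (h1 : PySem.Int.band s t1 = 0) (h2 : PySem.Int.band s t2 = 0)
    (he : PySem.Int.bor s t1 = PySem.Int.bor s t2) : t1 = t2 := by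
  by_cases hs : (0:Int) ≤ s <;> by_cases ht1 : (0:Int) ≤ t1 <;> by_cases ht2 : (0:Int) ≤ t2 <;>
    simp only [PySem.Int.band, PySem.Int.bor, hs, ht1, ht2,
      if_pos, if_neg, not_false_iff] at h1 h2 he
  -- s ≥ 0, t1 ≥ 0, t2 ≥ 0: disjoint Nat or is injective
  · have hb1 : s.toNat &&& t1.toNat = 0 := by exact_mod_cast h1
    have hb2 : s.toNat &&& t2.toNat = 0 := by exact_mod_cast h2
    have hee : s.toNat ||| t1.toNat = s.toNat ||| t2.toNat := by exact_mod_cast he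
    have := pv_nat_or_inj _ _ _ hb1 hb2 hee
    omega
  -- s ≥ 0, t1 ≥ 0, t2 < 0: the two unions have different signs
  · generalize s.toNat ||| t1.toNat = x at he
    generalize (-t2 - 1).toNat - ((-t2 - 1).toNat &&& s.toNat) = y at he
    omega
  -- s ≥ 0, t1 < 0, t2 ≥ 0: same, symmetric
  · generalize s.toNat ||| t2.toNat = x at he
    generalize (-t1 - 1).toNat - ((-t1 - 1).toNat &&& s.toNat) = y at he
    omega
  -- s ≥ 0, t1 < 0, t2 < 0: a := s.toNat is contained in both masks mi := (-ti-1).toNat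
  · have hm1 : s.toNat &&& (-t1 - 1).toNat = s.toNat := by
      have hle := Nat.and_le_left (n := s.toNat) (m := (-t1 - 1).toNat)
      omega
    have hm2 : s.toNat &&& (-t2 - 1).toNat = s.toNat := by
      have hle := Nat.and_le_left (n := s.toNat) (m := (-t2 - 1).toNat)
      omega
    have hc1 : (-t1 - 1).toNat &&& s.toNat = s.toNat := by rw [Nat.and_comm]; exact hm1
    have hc2 : (-t2 - 1).toNat &&& s.toNat = s.toNat := by rw [Nat.and_comm]; exact hm2
    rw [hc1, hc2] at he
    have hle1 : s.toNat ≤ (-t1 - 1).toNat := by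
      conv_lhs => rw [← hm1]
      exact Nat.and_le_right
    have hle2 : s.toNat ≤ (-t2 - 1).toNat := by
      conv_lhs => rw [← hm2]
      exact Nat.and_le_right
    omega
  -- s < 0, t1 ≥ 0, t2 ≥ 0: both ti are contained in the mask m := (-s-1).toNat
  · have hm1 : t1.toNat &&& (-s - 1).toNat = t1.toNat := by
      have hle := Nat.and_le_left (n := t1.toNat) (m := (-s - 1).toNat)
      omega
    have hm2 : t2.toNat &&& (-s - 1).toNat = t2.toNat := by
      have hle := Nat.and_le_left (n := t2.toNat) (m := (-s - 1).toNat)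
      omega
    have hc1 : (-s - 1).toNat &&& t1.toNat = t1.toNat := by rw [Nat.and_comm]; exact hm1
    have hc2 : (-s - 1).toNat &&& t2.toNat = t2.toNat := by rw [Nat.and_comm]; exact hm2
    rw [hc1, hc2] at he
    have hle1 : t1.toNat ≤ (-s - 1).toNat := by
      conv_lhs => rw [← hm1]
      exact Nat.and_le_right
    have hle2 : t2.toNat ≤ (-s - 1).toNat := by
      conv_lhs => rw [← hm2]
      exact Nat.and_le_right
    omega
  -- s < 0, t2 < 0: band s t2 is negative, contradicting h2
  · generalize (-s - 1).toNat ||| (-t2 - 1).toNat = y at h2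
    omega
  -- s < 0, t1 < 0: band s t1 is negative, contradicting h1
  · generalize (-s - 1).toNat ||| (-t1 - 1).toNat = y at h1
    omega
  · generalize (-s - 1).toNat ||| (-t1 - 1).toNat = y at h1
    omega

lemma pv_row_nodup (g : List Int) (s : Int) (hg : g.Nodup) :
    ((g.filter (fun t => decide (PySem.Int.band s t = 0))).map
      (fun t => PySem.Int.bor s t)).Nodup := by
  refine List.Nodup.map_on ?_ (hg.filter _)
  intro x hx y hy hxy
  exact pv_bor_inj s x y
    (of_decide_eq_true (List.mem_filter.mp hx).2)
    (of_decide_eq_true (List.mem_filter.mp hy).2)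
    hxy

lemma pv_row_spec (g : List Int) (s : Int) (hg : g.Nodup) (x : Int) :
    x ∈ pvRow g s ↔ (pvUnions [s] g).count x % 2 = 1 := by
  have hU : pvUnions [s] g
      = (g.filter (fun t => decide (PySem.Int.band s t = 0))).map (fun t => PySem.Int.bor s t) := by
    simp [pvUnions]
  rw [pvRow, PySem.Set.mem_ofList, hU]
  constructor
  · intro hx
    rw [List.count_eq_one_of_mem (pv_row_nodup g s hg) hx]
  · intro hc
    by_contra hx
    rw [List.count_eq_zero_of_not_mem hx] at hc
    omega

-- the divide-and-conquer helper computes exactly the odd-parity unions of its slice of f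
lemma pv_go_spec (fs g : List Int) (hg : g.Nodup) :
    ∀ (n lo hi : Nat), hi - lo ≤ n → hi ≤ fs.length →
      (pvGo fs g n lo hi).Nodup ∧
      ∀ x, x ∈ pvGo fs g n lo hi ↔
        (pvUnions ((fs.drop lo).take (hi - lo)) g).count x % 2 = 1 := by
  intro n
  induction n with
  | zero =>
    intro lo hi hn hhi
    have h0 : hi - lo = 0 := by omega
    rw [pvGo, h0]
    refine ⟨List.nodup_nil, fun x => ?_⟩
    simp [PySem.Set.empty, pvUnions]
  | succ n ih =>
    intro lo hi hn hhi
    by_cases h0 : hi - lo = 0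
    · rw [pvGo, if_pos h0, h0]
      refine ⟨List.nodup_nil, fun x => ?_⟩
      simp [PySem.Set.empty, pvUnions]
    · by_cases h1 : hi - lo = 1
      · rw [pvGo, if_neg h0, if_pos h1, h1]
        have hlt : lo < fs.length := by omega
        have hslice : (fs.drop lo).take 1 = [fs.getD lo 0] := by
          rw [List.drop_eq_getElem_cons hlt, List.take_succ_cons, List.take_zero,
            List.getD_eq_getElem fs 0 hlt]
        rw [hslice]
        exact ⟨PySem.Set.nodup_ofList _, fun x => pv_row_spec g _ hg x⟩
      · rw [pvGo, if_neg h0, if_neg h1]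
        obtain ⟨hn1, hmem1⟩ := ih lo ((lo + hi) / 2) (by omega) (by omega)
        obtain ⟨hn2, hmem2⟩ := ih ((lo + hi) / 2) hi (by omega) hhi
        refine ⟨PySem.Set.nodup_symmDiff _ _ hn1 hn2, fun x => ?_⟩
        have hsplit : (fs.drop lo).take (hi - lo)
            = (fs.drop lo).take ((lo + hi) / 2 - lo)
              ++ (fs.drop ((lo + hi) / 2)).take (hi - (lo + hi) / 2) := by
          have h : hi - lo = ((lo + hi) / 2 - lo) + (hi - (lo + hi) / 2) := by omega
          rw [h, List.take_add, List.drop_drop]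
          have h2 : lo + ((lo + hi) / 2 - lo) = (lo + hi) / 2 := by omega
          rw [h2]
        rw [PySem.Set.mem_symmDiff, hmem1 x, hmem2 x, hsplit]
        have hUapp : pvUnions
            ((fs.drop lo).take ((lo + hi) / 2 - lo) ++ (fs.drop ((lo + hi) / 2)).take (hi - (lo + hi) / 2)) g
            = pvUnions ((fs.drop lo).take ((lo + hi) / 2 - lo)) g
              ++ pvUnions ((fs.drop ((lo + hi) / 2)).take (hi - (lo + hi) / 2)) g := by
          simp [pvUnions]
        rw [hUapp, List.count_append]
        omega

-- nodup lists with the same members have the same sorted order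
lemma pv_sorted_congr (l1 l2 : List Int) (h1 : l1.Nodup) (h2 : l2.Nodup)
    (hm : ∀ x, x ∈ l1 ↔ x ∈ l2) :
    PySem.List.sorted l1 (fun x => x) false = PySem.List.sorted l2 (fun x => x) false := by
  refine PySem.List.sorted_eq_of_perm_of_pairwise_lt _ _ _ ?_ ?_
  · refine (PySem.List.sorted_perm _ _ _).trans ?_
    rw [List.perm_ext_iff_of_nodup h2 h1]
    intro a
    exact (hm a).symm
  · have hp := PySem.List.sorted_pairwise l2 (fun x => x)
    have hnd : (PySem.List.sorted l2 (fun x => x) false).Nodup :=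
      (PySem.List.sorted_perm _ _ _).nodup_iff.mpr h2
    exact (hp.and hnd).imp (fun {a b} ⟨hle, hne⟩ => lt_of_le_of_ne hle hne)

-- ===== VERDICT (by name: the statement is the Claim_ definition above) =====
theorem sparse_wedge_spec : Claim_equal_sparse_wedge := by
  intro f g _ hg
  unfold Spec_sparse_wedge sparse_wedge sparse_wedge_alt
  rw [pv_loop_A f g]
  obtain ⟨hAn, hAm⟩ := pv_toggle_fold (pvUnions f g) PySem.Set.empty List.nodup_nil
  obtain ⟨hBn, hBm⟩ := pv_go_spec f g hg f.length 0 f.length (by omega) (le_refl _)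
  refine pv_sorted_congr _ _ hAn hBn (fun x => ?_)
  rw [hAm x, hBm x]
  simp only [List.drop_zero, Nat.sub_zero, List.take_length]
  simp only [PySem.Set.empty, List.not_mem_nil, false_iff]
  omega
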